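-- pv_equiv track=rewrite | github.com/imscs21/myuniv | 1학기/programming/basic/파이썬/파이썬 과제/homework/hw2.py | take1
-- ===== SOURCE A (Python) =====
-- def take1(s,n):
--
--     if(s!=[] and n>= 0):
--         v = s[n]
--         if(s[0]!=v):
--
--             return [s[0]]+take1(s[1:],n-1)
--         else:
--             return []
--
--     else:
--         return s
-- ===== SOURCE B (Python) =====
-- def take1(s, n):
--     # Iterative: fetch the pivot once, scan forward with an accumulator.
--     if s == [] or n < 0:
--         return s
--     v = s[n]
--     out = []
--     for x in s:
--         if x == v:
--             return out
--         out.append(x)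
--     return out
-- ===== Notes on version B (the rewrite author's own statement) =====
-- stated objective: alternative
-- what changed: Replaces A's slicing recursion (which copies the tail at every step) with a single iterative forward scan that fetches the pivot s[n] once and accumulates the prefix into a list.
import Mathlib
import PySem

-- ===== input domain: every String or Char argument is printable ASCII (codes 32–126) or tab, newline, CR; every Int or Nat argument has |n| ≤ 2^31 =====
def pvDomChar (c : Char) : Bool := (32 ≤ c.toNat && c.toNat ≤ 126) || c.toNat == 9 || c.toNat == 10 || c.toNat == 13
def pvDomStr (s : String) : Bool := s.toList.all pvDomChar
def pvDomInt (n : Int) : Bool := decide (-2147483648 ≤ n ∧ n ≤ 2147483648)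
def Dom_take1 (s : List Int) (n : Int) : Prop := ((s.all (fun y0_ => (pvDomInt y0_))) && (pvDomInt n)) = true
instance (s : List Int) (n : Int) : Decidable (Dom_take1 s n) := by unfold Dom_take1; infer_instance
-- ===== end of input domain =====

-- B replaces A's slicing recursion with one iterative forward scan that fetches the pivot once and accumulates the prefix.

-- ===== PORT A =====
-- A: recursion with s[1:] and n-1; 'none' from s[n] is an IndexError, excluded by Pre_take1.
def take1 (s : List Int) (n : Int) : List Int :=
  if s ≠ [] ∧ n ≥ 0 then
    match h : PySem.List.pyGet? s n with
    | none => []   -- IndexError (outside Pre_take1)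
    | some v =>
      match s with
      | [] => []   -- unreachable: s ≠ []
      | x :: t => if x ≠ v then x :: take1 t (n - 1) else []
  else s
termination_by s.length
decreasing_by simp

-- ===== PORT B =====
-- B's for-loop over s with accumulator 'out' and early return on x == v.
def take1AltLoop (v : Int) (s : List Int) (out : List Int) : List Int :=
  match s with
  | [] => out
  | x :: t => if x = v then out else take1AltLoop v t (out ++ [x])

def take1_alt (s : List Int) (n : Int) : List Int :=
  if s = [] ∨ n < 0 then s
  else
    match PySem.List.pyGet? s n with
    | none => []   -- IndexError (outside Pre_take1)
    | some v => take1AltLoop v s []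

-- ===== PRECONDITION & SPEC =====
-- Pre_ excludes exactly the inputs where A raises IndexError (s nonempty, 0 ≤ n, n ≥ len(s)); B raises there too.
def Pre_take1 (s : List Int) (n : Int) : Prop := s = [] ∨ n < 0 ∨ n < s.length
instance (s : List Int) (n : Int) : Decidable (Pre_take1 s n) := by unfold Pre_take1; infer_instance
def pvWitness_take1 : List Int × Int := ([3, 1, 4, 1], 3)

def Spec_take1 (s : List Int) (n : Int) (out : List Int) : Prop := out = take1_alt s n
instance (s : List Int) (n : Int) (out : List Int) : Decidable (Spec_take1 s n out) := by unfold Spec_take1; infer_instance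

-- ===== CLAIM (what is proved, stated in full; the proofs are below) =====
def Claim_equal_take1 : Prop := ∀ (s : List Int) (n : Int), Dom_take1 s n → Pre_take1 s n → Spec_take1 s n (take1 s n)

-- ===== LEMMAS AND PROOFS =====

theorem take1AltLoop_acc (v : Int) (s : List Int) (acc : List Int) :
    take1AltLoop v s acc = acc ++ take1AltLoop v s [] := by
  induction s generalizing acc with
  | nil => simp [take1AltLoop]
  | cons x t ih =>
    by_cases h : x = v
    · simp [take1AltLoop, h]
    · simp only [take1AltLoop, if_neg h, List.nil_append]
      rw [ih (acc ++ [x]), ih [x]]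
      simp

theorem take1_eq_loop (s : List Int) (n : Int) (v : Int)
    (hn : 0 ≤ n) (hv : PySem.List.pyGet? s n = some v) :
    take1 s n = take1AltLoop v s [] := by
  induction s generalizing n with
  | nil => simp [PySem.List.pyGet?, PySem.List.pyIdx?] at hv
  | cons x t ih =>
    have hnz : ¬ (x :: t = []) := by simp
    rw [take1]
    rw [if_pos ⟨by simp, hn⟩]
    split
    · next h => rw [hv] at h; cases h
    · next w h =>
      rw [hv] at h
      injection h with h; subst h
      by_cases hx : x = v
      · simp [take1AltLoop, hx]
      · simp only [take1AltLoop, if_neg hx, List.nil_append]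
        -- n ≠ 0 since s[0] ≠ v
        have hn0 : n ≠ 0 := by
          intro h0; subst h0
          simp at hv
          exact hx hv
        have hn1 : 0 ≤ n - 1 := by omega
        have hv' : PySem.List.pyGet? t (n - 1) = some v := by
          rw [PySem.List.pyGet?_of_nonneg t hn1]
          rw [PySem.List.pyGet?_of_nonneg (x :: t) hn] at hv
          have ht : n.toNat = (n - 1).toNat + 1 := by omega
          rw [ht] at hv
          simpa using hv
        rw [if_pos hx, ih (n - 1) hn1 hv', take1AltLoop_acc v t [x]]
        simp

-- ===== VERDICT (by name: the statement is the Claim_ definition above) =====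
theorem take1_spec : Claim_equal_take1 := by
  intro s n _ hpre
  unfold Spec_take1 take1_alt
  by_cases hbase : s = [] ∨ n < 0
  · rw [if_pos hbase]
    rcases hbase with h | h
    · subst h; rw [take1]; simp
    · rw [take1]; rw [if_neg (by intro ⟨_, h2⟩; omega)]
  · push Not at hbase
    obtain ⟨hne, hn0⟩ := hbase
    rw [if_neg (by push Not; exact ⟨hne, hn0⟩)]
    have hlt : n < s.length := by
      rcases hpre with h | h | h
      · exact absurd h hne
      · omega
      · exact h
    obtain ⟨v, hv⟩ : ∃ v, PySem.List.pyGet? s n = some v := by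
      rw [PySem.List.pyGet?_of_nonneg s (by omega)]
      exact ⟨_, List.getElem?_eq_getElem (by omega)⟩
    rw [hv]
    exact take1_eq_loop s n v (by omega) hv
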